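-- pv_equiv track=rewrite | github.com/kids-first/kf-somatic-workflow | scripts/sbg_multicnv_methods.py | majority_call
-- ===== SOURCE A (Python) =====
-- from collections import Counter
--
-- def majority_call(row, list_of_callers_index):
--     """
--     Return value is the most common value. If two values are most common, result is ambiguous.
--     """
--     all_calls = []
--     for i in range(min(list_of_callers_index), max(list_of_callers_index) + 1):
--         all_calls.append(row[i])
--     c = Counter(all_calls)
--     if len(c.most_common()) > 1:
--         if not (c.most_common()[0][1] == c.most_common()[1][1]):
--             value, count = c.most_common()[0]
--             return value
--         else:
--             return 'ambiguous'
--     else: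
--         value, count = c.most_common()[0]
--         return value
-- ===== SOURCE B (Python) =====
-- def _best(vals):
--     # (max multiplicity in vals, its unique holder or 'ambiguous'),
--     # by recursion that eliminates one distinct value per step.
--     if not vals:
--         return (0, 'ambiguous')
--     v = vals[0]
--     c = vals.count(v)
--     bl, w = _best([x for x in vals if x != v])
--     if c > bl:
--         return (c, v)
--     if c == bl:
--         return (c, 'ambiguous')
--     return (bl, w)
--
-- def majority_call(row, list_of_callers_index):
--     """
--     Return value is the most common value. If two values are most common, result is ambiguous.
--     """
--     vals = [row[i] for i in range(min(list_of_callers_index), max(list_of_callers_index) + 1)]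
--     return _best(vals)[1]
-- ===== Notes on version B (the rewrite author's own statement) =====
-- stated objective: alternative
-- what changed: Replaces the Counter + most_common() sort and top-two comparison by a dict-free, sort-free recursion that eliminates one distinct value per step (count head, filter it out, recurse) and combines (max-count, winner-or-ambiguous) pairs on the way back.
import Mathlib
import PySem

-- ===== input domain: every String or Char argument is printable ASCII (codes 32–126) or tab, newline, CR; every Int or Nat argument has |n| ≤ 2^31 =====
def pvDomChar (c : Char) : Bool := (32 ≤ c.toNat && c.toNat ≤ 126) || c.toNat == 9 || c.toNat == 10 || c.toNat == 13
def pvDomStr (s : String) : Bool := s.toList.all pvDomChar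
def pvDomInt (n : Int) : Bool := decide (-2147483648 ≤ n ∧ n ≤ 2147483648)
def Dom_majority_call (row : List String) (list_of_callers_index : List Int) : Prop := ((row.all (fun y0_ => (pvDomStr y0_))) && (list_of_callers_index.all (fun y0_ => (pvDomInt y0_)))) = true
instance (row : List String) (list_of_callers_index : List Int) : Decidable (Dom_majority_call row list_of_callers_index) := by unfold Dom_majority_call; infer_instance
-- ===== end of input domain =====

-- B replaces Counter + most_common() sort + top-two comparison by a dict-free, sort-free
-- recursion eliminating one distinct value per step (alternative decomposition, no speed claim).

-- ===== PORT A =====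
def majority_call (row : List String) (list_of_callers_index : List Int) : String :=
  match PySem.List.min? list_of_callers_index (fun x => x),
        PySem.List.max? list_of_callers_index (fun x => x) with
  | some lo, some hi =>
      let all_calls := (PySem.List.pyRange lo (hi + 1) 1).foldl
        (fun acc i => acc ++ [(PySem.List.pyGet? row i).getD ""]) []
      let c := PySem.Dict.counter all_calls
      -- c.most_common() = items sorted by count, descending (stable)
      match PySem.List.sorted c.items (fun p => p.2) true with
      | [] => ""                         -- unreachable under Pre_ (Python raises IndexError)
      | [p] => p.1
      | p0 :: p1 :: _ => if p0.2 ≠ p1.2 then p0.1 else "ambiguous"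
  | _, _ => ""                           -- unreachable under Pre_ (Python raises ValueError)

-- ===== PORT B =====
-- _best(vals): recursion on the distinct values — count the head value, filter it out, recurse.
def pvBest (vals : List String) : Int × String :=
  match vals with
  | [] => (0, "ambiguous")
  | v :: t =>
    let c : Int := ((v :: t).count v : Int)
    let rest := (v :: t).filter (fun x => x ≠ v)
    let p := pvBest rest
    if c > p.1 then (c, v)
    else if c == p.1 then (c, "ambiguous")
    else p
termination_by vals.length
decreasing_by
  exact List.length_filter_lt_length_iff_exists.mpr ⟨v, by simp⟩

def majority_call_alt (row : List String) (list_of_callers_index : List Int) : String :=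
  match PySem.List.min? list_of_callers_index (fun x => x) with
  | none => ""                           -- unreachable under Pre_ (Python raises ValueError)
  | some lo =>
    match PySem.List.max? list_of_callers_index (fun x => x) with
    | none => ""                         -- unreachable under Pre_ (Python raises ValueError)
    | some hi =>
      let vals := (PySem.List.pyRange lo (hi + 1) 1).map
        (fun i => (PySem.List.pyGet? row i).getD "")
      (pvBest vals).2

-- ===== PRECONDITION & SPEC =====
-- Pre_ excludes exactly the inputs on which the Python A raises: an empty index list
-- (ValueError from min()) or an index list whose min/max interval leaves row's index
-- range (IndexError). Since every i in range(min,max+1) lies between two list elements,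
-- "every list element is a valid (possibly negative) index of row" is exactly that condition.
def Pre_majority_call (row : List String) (list_of_callers_index : List Int) : Prop :=
  list_of_callers_index ≠ [] ∧
  ∀ i ∈ list_of_callers_index, -(row.length : Int) ≤ i ∧ i < (row.length : Int)
instance (row : List String) (list_of_callers_index : List Int) : Decidable (Pre_majority_call row list_of_callers_index) := by unfold Pre_majority_call; infer_instance
def pvWitness_majority_call : List String × List Int := (["a", "b", "a"], [0, 2])

def Spec_majority_call (row : List String) (list_of_callers_index : List Int) (out : String) : Prop := out = majority_call_alt row list_of_callers_index
instance (row : List String) (list_of_callers_index : List Int) (out : String) : Decidable (Spec_majority_call row list_of_callers_index out) := by unfold Spec_majority_call; infer_instance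

-- ===== CLAIM (what is proved, stated in full; the proofs are below) =====
def Claim_equal_majority_call : Prop := ∀ (row : List String) (list_of_callers_index : List Int), Dom_majority_call row list_of_callers_index → Pre_majority_call row list_of_callers_index → Spec_majority_call row list_of_callers_index (majority_call row list_of_callers_index)

-- ===== LEMMAS AND PROOFS =====

-- A's append-loop builds the mapped list.
theorem foldl_append_map {α β : Type} (f : α → β) (l : List α) (acc : List β) :
    l.foldl (fun a x => a ++ [f x]) acc = acc ++ l.map f := by
  induction l generalizing acc with
  | nil => simp
  | cons x t ih => simp [List.foldl_cons, ih, List.append_assoc]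

-- Core (A side): the sorted-top-two decision equals the max + tie-filter decision,
-- for an arbitrary association list of (value, count) pairs.
theorem core (ps : List (String × Int)) :
    (match PySem.List.sorted ps (fun p => p.2) true with
     | [] => ""
     | [p] => p.1
     | p0 :: p1 :: _ => if p0.2 ≠ p1.2 then p0.1 else "ambiguous")
    =
    (match PySem.List.max? (ps.map (fun p => p.2)) (fun x => x) with
     | none => ""
     | some mx =>
       match (ps.filter (fun p => p.2 == mx)).map (fun p => p.1) with
       | [w] => w
       | _ => "ambiguous") := by
  rcases h : PySem.List.sorted ps (fun p => p.2) true with _ | ⟨p0, _ | ⟨p1, rest⟩⟩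
  · have hps : ps = [] := (PySem.List.sorted_eq_nil_iff ps (fun p => p.2) true).mp h
    subst hps; rfl
  · have hperm : ([p0] : List (String × Int)).Perm ps := h ▸ PySem.List.sorted_perm ps (fun p => p.2) true
    have hps : ps = [p0] := (List.singleton_perm.mp hperm).symm
    subst hps
    simp [PySem.List.max?]
  · have hperm : (p0 :: p1 :: rest).Perm ps := h ▸ PySem.List.sorted_perm ps (fun p => p.2) true
    have hpw : (p0 :: p1 :: rest).Pairwise (fun a b => b.2 ≤ a.2) :=
      h ▸ PySem.List.sorted_pairwise_rev ps (fun p => p.2)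
    have hmaxhead : ∀ y ∈ ps, y.2 ≤ p0.2 :=
      PySem.List.key_head_sorted_rev_ge (xs := ps) (key := fun p => p.2) h
    have hpsne : ps ≠ [] := by
      intro hnil; rw [hnil] at hperm; exact absurd hperm.symm (by simp)
    rcases hv : PySem.List.max? (ps.map (fun p => p.2)) (fun x => x) with _ | v
    · rw [PySem.List.max?_eq_none_iff] at hv
      exact absurd (List.map_eq_nil_iff.mp hv) hpsne
    have hvmem : v ∈ ps.map (fun p => p.2) := PySem.List.max?_mem hv
    have hvmax : ∀ y ∈ ps.map (fun p => p.2), y ≤ v := by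
      intro y hy; simpa using PySem.List.max?_isMax hv y hy
    have hvp0 : v = p0.2 := by
      obtain ⟨q, hq, hqv⟩ := List.mem_map.mp hvmem
      have h1 : v ≤ p0.2 := hqv ▸ hmaxhead q hq
      have h2 : p0.2 ≤ v := hvmax p0.2 (List.mem_map.mpr ⟨p0, hperm.subset (by simp), rfl⟩)
      omega
    subst hvp0
    have hfp : ((p0 :: p1 :: rest).filter (fun p => p.2 == p0.2)).Perm
        (ps.filter (fun p => p.2 == p0.2)) := hperm.filter _
    rw [hv]
    simp only
    by_cases hne : p0.2 = p1.2
    · have hflt : 2 ≤ (ps.filter (fun p => p.2 == p0.2)).length := by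
        have h2 : 2 ≤ ((p0 :: p1 :: rest).filter (fun p => p.2 == p0.2)).length := by
          simp [hne.symm]
        rw [← hfp.length_eq]; exact h2
      rw [if_neg (by omega : ¬ p0.2 ≠ p1.2)]
      rcases hfe : ps.filter (fun p => p.2 == p0.2) with _ | ⟨a, _ | ⟨b, t⟩⟩ <;>
        rw [hfe] at hflt
      · simp at hflt
      · simp at hflt
      · rw [hfe]; rfl
    · have hp1le : p1.2 ≤ p0.2 := (List.pairwise_cons.mp hpw).1 p1 (by simp)
      have hrestle : ∀ q ∈ rest, q.2 ≤ p1.2 :=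
        (List.pairwise_cons.mp (List.pairwise_cons.mp hpw).2).1
      have hfs : (p0 :: p1 :: rest).filter (fun p => p.2 == p0.2) = [p0] := by
        have hb1 : (p1.2 == p0.2) = false := by simp; omega
        have hfr : rest.filter (fun p => p.2 == p0.2) = [] := by
          rw [List.filter_eq_nil_iff]
          intro q hq
          have hq2 := hrestle q hq
          simp; omega
        simp [hb1, hfr]
      rw [hfs] at hfp
      have hpf : ps.filter (fun p => p.2 == p0.2) = [p0] := (List.singleton_perm.mp hfp).symm
      rw [hpf]
      simp [hne]

theorem ofList_filter_ne (v : String) (t : List String) :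
    PySem.Set.ofList (t.filter (fun x => x ≠ v)) = PySem.Set.discard (PySem.Set.ofList t) v := by
  induction t with
  | nil => rfl
  | cons x xs ih =>
    by_cases hx : x = v
    · subst hx
      rw [List.filter_cons_of_neg (by simp), ih, PySem.Set.ofList_cons]
      simp [PySem.Set.discard, List.filter_filter]
    · rw [List.filter_cons_of_pos (by simp [hx]), PySem.Set.ofList_cons, PySem.Set.ofList_cons, ih]
      simp only [PySem.Set.discard, List.filter_cons, List.filter_filter]
      have hb : (!(x == v)) = true := by simp [hx]
      simp [hb]
      exact List.filter_congr (fun y _ => by rw [Bool.and_comm])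

theorem foldl_max_max (t : List Int) (a b : Int) :
    t.foldl max (max a b) = max a (t.foldl max b) := by
  induction t generalizing b with
  | nil => rfl
  | cons y tl ih => simp [List.foldl_cons, max_assoc, ih]

theorem max?_id_cons_some {l : List Int} {bl : Int} (c : Int)
    (h : PySem.List.max? l (fun x => x) = some bl) :
    PySem.List.max? (c :: l) (fun x => x) = some (max c bl) := by
  rcases l with _ | ⟨x, t⟩
  · simp [PySem.List.max?] at h
  · rw [PySem.List.max?_id_cons] at h ⊢
    injection h with h
    rw [List.foldl_cons, foldl_max_max, h]

-- counter items of v::t decompose as head pair plus counter items of the v-free remainder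
theorem items_counter_cons (v : String) (t : List String) :
    (PySem.Dict.counter (v :: t)).items
      = (v, ((v :: t).count v : Int)) ::
        (PySem.Dict.counter (t.filter (fun x => x ≠ v))).items := by
  rw [PySem.Dict.items_counter, PySem.Dict.items_counter, PySem.Set.ofList_cons, List.map_cons]
  congr 1
  rw [← ofList_filter_ne]
  apply List.map_congr_left
  intro k hk
  have hkne : k ≠ v := by
    have h := (PySem.Set.mem_ofList _ k).mp hk
    simp at h; exact h.2
  have h1 : (v :: t).count k = t.count k := by
    rw [List.count_cons]; simp [Ne.symm hkne]
  have h2 : (t.filter (fun x => !decide (x = v))).count k = t.count k :=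
    List.count_filter (by simp [hkne])
  simp only [h1, ← h2, ne_eq, decide_not]

theorem best_char (vals : List String) (hne : vals ≠ []) :
    ∃ mx, PySem.List.max? (((PySem.Dict.counter vals).items).map (fun p => p.2)) (fun x => x) = some mx ∧
      pvBest vals = (mx,
        match (((PySem.Dict.counter vals).items).filter (fun p => p.2 == mx)).map (fun p => p.1) with
        | [w] => w
        | _ => "ambiguous") := by
  induction hn : vals.length using Nat.strong_induction_on generalizing vals with
  | _ n ih =>
  rcases vals with _ | ⟨v, t⟩
  · exact absurd rfl hne
  set c : Int := ((v :: t).count v : Int) with hc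
  set rest := (v :: t).filter (fun x => x ≠ v) with hrestdef
  have hrest_t : rest = t.filter (fun x => x ≠ v) := by
    rw [hrestdef, List.filter_cons_of_neg (by simp)]
  have hrlen : rest.length < n := by
    subst hn
    exact List.length_filter_lt_length_iff_exists.mpr ⟨v, by simp⟩
  have hcpos : (0 : Int) < c := by
    rw [hc]
    have : 0 < (v :: t).count v := List.count_pos_iff.mpr (by simp)
    omega
  have hitems : (PySem.Dict.counter (v :: t)).items
      = (v, c) :: (PySem.Dict.counter rest).items := by
    rw [hrest_t]; exact items_counter_cons v t
  have hunfold : pvBest (v :: t) =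
      (if c > (pvBest rest).1 then (c, v)
       else if c == (pvBest rest).1 then (c, "ambiguous")
       else pvBest rest) := by
    rw [pvBest]
  by_cases hrnil : rest = []
  · refine ⟨c, ?_, ?_⟩
    · rw [hitems, hrnil]
      simp [PySem.Dict.counter, PySem.List.max?, PySem.Dict.empty]
    · rw [hunfold, hrnil]
      have hp0 : pvBest ([] : List String) = (0, "ambiguous") := by rw [pvBest]
      rw [hp0]
      simp only [hitems, hrnil]
      have : c > (0:Int) := hcpos
      rw [if_pos this]
      simp [PySem.Dict.counter, PySem.Dict.empty]
  · obtain ⟨bl, hbl, hpb⟩ := ih rest.length hrlen rest hrnil rfl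
    have hmax : PySem.List.max? (((PySem.Dict.counter (v :: t)).items).map (fun p => p.2)) (fun x => x)
        = some (max c bl) := by
      rw [hitems, List.map_cons]
      exact max?_id_cons_some c hbl
    have hblmem : bl ∈ ((PySem.Dict.counter rest).items).map (fun p => p.2) :=
      PySem.List.max?_mem hbl
    have hblmax : ∀ y ∈ ((PySem.Dict.counter rest).items).map (fun p => p.2), y ≤ bl := by
      intro y hy; simpa using PySem.List.max?_isMax hbl y hy
    refine ⟨max c bl, hmax, ?_⟩
    rcases lt_trichotomy c bl with hlt | heq | hgt
    · -- c < bl : head filtered out, result = pvBest rest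
      have hmx : max c bl = bl := by omega
      rw [hmx, hunfold, hpb]
      rw [if_neg (by simp; omega), if_neg (by simp; omega)]
      rw [hitems, List.filter_cons_of_neg (by simp; omega)]
    · -- tie
      have hmx : max c bl = bl := by omega
      subst heq
      rw [hmx, hunfold, hpb]
      rw [if_neg (by simp), if_pos (by simp)]
      rw [hitems, List.filter_cons_of_pos (by simp)]
      obtain ⟨p, hpmem, hp2⟩ := List.mem_map.mp hblmem
      have : p ∈ ((PySem.Dict.counter rest).items).filter (fun p => p.2 == c) :=
        List.mem_filter.mpr ⟨hpmem, by simp [hp2]⟩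
      rcases hfe : ((PySem.Dict.counter rest).items).filter (fun q => q.2 == c) with _ | ⟨a, t2⟩
      · exact absurd (hfe ▸ this) (by simp)
      · rw [hfe, List.map_cons]
        rfl
    · -- c > bl : unique winner v
      have hmx : max c bl = c := by omega
      rw [hmx, hunfold]
      rw [if_pos (by simp [hpb]; omega)]
      rw [hitems, List.filter_cons_of_pos (by simp)]
      have hfr : ((PySem.Dict.counter rest).items).filter (fun q => q.2 == c) = [] := by
        rw [List.filter_eq_nil_iff]
        intro q hq
        have := hblmax q.2 (List.mem_map.mpr ⟨q, hq, rfl⟩)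
        simp; omega
      rw [hfr, List.map_cons, List.map_nil]

theorem majority_call_eq (row : List String) (list_of_callers_index : List Int) :
    majority_call row list_of_callers_index = majority_call_alt row list_of_callers_index := by
  unfold majority_call majority_call_alt
  rcases hmin : PySem.List.min? list_of_callers_index (fun x => x) with _ | lo
  · rcases hmax : PySem.List.max? list_of_callers_index (fun x => x) with _ | hi <;> rfl
  rcases hmax : PySem.List.max? list_of_callers_index (fun x => x) with _ | hi
  · rfl
  simp only
  rw [foldl_append_map]
  simp only [List.nil_append]
  have hlohi : lo ≤ hi := by
    have hmem := PySem.List.min?_mem hmin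
    simpa using PySem.List.max?_isMax hmax lo hmem
  have hvne : (PySem.List.pyRange lo (hi + 1) 1).map
      (fun i => (PySem.List.pyGet? row i).getD "") ≠ [] := by
    rw [PySem.List.pyRange_one_cons (by omega : lo < hi + 1)]
    simp
  obtain ⟨mx, hmx, hpb⟩ := best_char _ hvne
  rw [core, hmx, hpb]

-- ===== VERDICT (by name: the statement is the Claim_ definition above) =====
theorem majority_call_spec : Claim_equal_majority_call := by
  intro row lst _ _
  unfold Spec_majority_call
  exact majority_call_eq row lst
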